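-- pv_equiv track=rewrite | github.com/MitraLab-Organization/bap-ontology-editor | scripts/generate_tree.py | build_children_map
-- ===== SOURCE A (Python) =====
-- from typing import Dict, List, Optional
-- from collections import defaultdict
--
-- def build_children_map(structures: Dict[str, dict]) -> Dict[Optional[str], List[str]]:
--     """Build a map of parent_id -> list of child_ids."""
--     children = defaultdict(list)
--
--     for struct_id, struct in structures.items():
--         parent_id = struct.get('parent')
--         children[parent_id].append(struct_id)
--
--     # Sort children by name for consistent output
--     for parent_id in children:
--         children[parent_id].sort(key=lambda x: structures[x].get('name', x))
--
--     return children
-- ===== SOURCE B (Python) =====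
-- def build_children_map(structures):
--     """Build a map of parent_id -> list of child_ids.
--
--     One global stable sort of all ids by display name; a single pass then
--     distributes the ids into per-parent buckets already in sorted order
--     (stability makes each bucket sorted), so no per-group sort is needed.
--     Buckets are pre-created in first-appearance order of the parents.
--     """
--     order = sorted(structures, key=lambda x: structures[x].get('name', x))
--     children = {structures[x].get('parent'): [] for x in structures}
--     for x in order:
--         children[structures[x].get('parent')].append(x)
--     return children
-- ===== Notes on version B (the rewrite author's own statement) =====
-- stated objective: alternative
-- what changed: Instead of grouping first and then sorting each bucket separately, B does one global stable sort of all ids by name and a single distribution pass into pre-created buckets, relying on sort stability to leave every bucket sorted; Pre_ requires distinct ids because a Python dict argument cannot contain duplicate keys, so duplicate-id association lists correspond to no real input.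
import Mathlib
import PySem

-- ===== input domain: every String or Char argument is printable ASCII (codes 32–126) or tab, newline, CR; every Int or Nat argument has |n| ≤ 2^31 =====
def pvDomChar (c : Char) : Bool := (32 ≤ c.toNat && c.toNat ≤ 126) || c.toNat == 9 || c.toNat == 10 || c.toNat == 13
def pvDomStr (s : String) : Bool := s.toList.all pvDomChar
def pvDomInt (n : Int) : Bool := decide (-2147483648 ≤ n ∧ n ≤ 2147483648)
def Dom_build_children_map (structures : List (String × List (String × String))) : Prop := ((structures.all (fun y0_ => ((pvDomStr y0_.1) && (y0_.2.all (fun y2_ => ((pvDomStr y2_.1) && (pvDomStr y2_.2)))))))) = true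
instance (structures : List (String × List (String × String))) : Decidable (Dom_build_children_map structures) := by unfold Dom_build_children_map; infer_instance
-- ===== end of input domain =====

-- B replaces A's group-then-sort-each-bucket with one global stable sort plus a single
-- distribution pass (alternative decomposition, same asymptotic cost).
-- Equivalence is about the RETURN value; neither program mutates its argument.

-- ===== PORT A =====
-- 'structures[x]' in A can only be reached with x a key of structures, so '.getD x []' is exact there.
def build_children_map (structures : List (String × List (String × String))) : List (Option String × List String) :=
  let children : PySem.Dict (Option String) (List String) :=
    structures.foldl (fun d p =>
      d.modify ((PySem.Dict.mk p.2).get? "parent") [] (fun v => v ++ [p.1])) PySem.Dict.empty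
  let children2 :=
    children.keys.foldl (fun d k =>
      d.insert k (PySem.List.sorted (d.getD k [])
        (fun x => (PySem.Dict.mk ((PySem.Dict.mk structures).getD x [])).getD "name" x) false)) children
  children2.items

-- ===== PORT B =====
-- 'children[...]' in B's final loop always hits a key created by the comprehension, so 'modify' is exact there.
def build_children_map_alt (structures : List (String × List (String × String))) : List (Option String × List String) :=
  let ids := structures.map Prod.fst
  let key := fun x => (PySem.Dict.mk ((PySem.Dict.mk structures).getD x [])).getD "name" x
  let parent := fun x => (PySem.Dict.mk ((PySem.Dict.mk structures).getD x [])).get? "parent"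
  let order := PySem.List.sorted ids key false
  let children0 : PySem.Dict (Option String) (List String) :=
    ids.foldl (fun d x => d.insert (parent x) []) PySem.Dict.empty
  let children :=
    order.foldl (fun d x => d.modify (parent x) [] (fun v => v ++ [x])) children0
  children.items

-- ===== PRECONDITION & SPEC =====
-- Pre_ requires the ids (top-level keys) to be distinct: the Python argument is a dict, which
-- cannot contain duplicate keys, so duplicate-id association lists encode no real input.
def Pre_build_children_map (structures : List (String × List (String × String))) : Prop :=
  (structures.map Prod.fst).Nodup
instance (structures : List (String × List (String × String))) : Decidable (Pre_build_children_map structures) := by unfold Pre_build_children_map; infer_instance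

def pvWitness_build_children_map : (List (String × List (String × String))) :=
  [("a", [("parent", "r"), ("name", "Beta")]), ("b", [("parent", "r"), ("name", "Alpha")]), ("r", [])]

def Spec_build_children_map (structures : List (String × List (String × String))) (out : List (Option String × List String)) : Prop := out = build_children_map_alt structures
instance (structures : List (String × List (String × String))) (out : List (Option String × List String)) : Decidable (Spec_build_children_map structures out) := by unfold Spec_build_children_map; infer_instance

-- ===== CLAIM (what is proved, stated in full; the proofs are below) =====
def Claim_equal_build_children_map : Prop := ∀ (structures : List (String × List (String × String))), Dom_build_children_map structures → Pre_build_children_map structures → Spec_build_children_map structures (build_children_map structures)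

-- ===== LEMMAS AND PROOFS =====

theorem pv_insertBy_filter_drop {α : Type} (before : α → α → Bool) (q : α → Bool) (x : α)
    (hx : q x = false) (ys : List α) :
    (PySem.List.insertBy before x ys).filter q = ys.filter q := by
  induction ys with
  | nil => simp [PySem.List.insertBy, hx]
  | cons y t ih =>
    by_cases h : before x y = true
    · simp [PySem.List.insertBy, h, hx]
    · simp only [Bool.not_eq_true] at h
      simp only [PySem.List.insertBy, h]
      simp [List.filter_cons, ih]

theorem pv_insertBy_all_before {α : Type} (before : α → α → Bool) (x : α) (ys : List α)
    (h : ∀ z ∈ ys, before x z = true) :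
    PySem.List.insertBy before x ys = x :: ys := by
  cases ys with
  | nil => rfl
  | cons y t => simp [PySem.List.insertBy, h y (by simp)]

theorem pv_insertBy_filter_keep {α κ : Type} [LinearOrder κ] (key : α → κ) (q : α → Bool) (x : α)
    (hx : q x = true) (ys : List α) (hys : ys.Pairwise (fun a b => key a ≤ key b)) :
    (PySem.List.insertBy (fun a b => decide (key a < key b)) x ys).filter q
      = PySem.List.insertBy (fun a b => decide (key a < key b)) x (ys.filter q) := by
  induction ys with
  | nil => simp [PySem.List.insertBy, hx]
  | cons y t ih =>
    rcases List.pairwise_cons.mp hys with ⟨hy, ht⟩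
    by_cases hlt : key x < key y
    · have h1 : PySem.List.insertBy (fun a b => decide (key a < key b)) x (y :: t) = x :: y :: t := by
        simp [PySem.List.insertBy, hlt]
      have h2 : PySem.List.insertBy (fun a b => decide (key a < key b)) x ((y :: t).filter q)
          = x :: (y :: t).filter q := by
        apply pv_insertBy_all_before
        intro z hz
        have hz' : z ∈ y :: t := List.mem_of_mem_filter hz
        rcases List.mem_cons.mp hz' with rfl | hz''
        · simpa using hlt
        · simpa using lt_of_lt_of_le hlt (hy z hz'')
      rw [h1, h2, List.filter_cons, hx]
      simp
    · have h1 : PySem.List.insertBy (fun a b => decide (key a < key b)) x (y :: t)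
          = y :: PySem.List.insertBy (fun a b => decide (key a < key b)) x t := by
        simp [PySem.List.insertBy, hlt]
      rw [h1]
      by_cases hqy : q y = true
      · simp only [List.filter_cons, hqy, if_pos]
        have h2 : PySem.List.insertBy (fun a b => decide (key a < key b)) x (y :: t.filter q)
            = y :: PySem.List.insertBy (fun a b => decide (key a < key b)) x (t.filter q) := by
          simp [PySem.List.insertBy, hlt]
        simp [h2, ih ht]
      · simp only [Bool.not_eq_true] at hqy
        simp [hqy, ih ht]

theorem pv_sorted_append_singleton {α κ : Type} [LT κ] [DecidableLT κ] (xs : List α) (x : α) (key : α → κ) :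
    PySem.List.sorted (xs ++ [x]) key false
      = PySem.List.insertBy (fun a b => decide (key a < key b)) x (PySem.List.sorted xs key false) := by
  rw [PySem.List.sorted_eq_foldl_insertBy, PySem.List.sorted_eq_foldl_insertBy, List.foldl_append]
  rfl

theorem pv_filter_sorted {α κ : Type} [LinearOrder κ] (key : α → κ) (q : α → Bool) (xs : List α) :
    (PySem.List.sorted xs key false).filter q = PySem.List.sorted (xs.filter q) key false := by
  induction xs using List.reverseRecOn with
  | nil => rfl
  | append_singleton xs x ih =>
    rw [pv_sorted_append_singleton, List.filter_append]
    by_cases hq : q x = true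
    · rw [pv_insertBy_filter_keep key q x hq _ (PySem.List.sorted_pairwise xs key), ih]
      have : List.filter q [x] = [x] := by simp [hq]
      rw [this, pv_sorted_append_singleton]
    · simp only [Bool.not_eq_true] at hq
      rw [pv_insertBy_filter_drop _ q x hq, ih]
      simp [hq]

theorem pv_set_update_subset {α : Type} [BEq α] [LawfulBEq α] (l : List α) (s : PySem.Set α)
    (h : ∀ x ∈ l, x ∈ s) : PySem.Set.update s l = s := by
  induction l generalizing s with
  | nil => rfl
  | cons x t ih =>
    have hadd : PySem.Set.add s x = s := by
      simp [PySem.Set.add, PySem.Set.contains, h x (by simp)]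
    show List.foldl PySem.Set.add (PySem.Set.add s x) t = s
    rw [hadd]
    exact ih s (fun y hy => h y (by simp [hy]))

theorem pv_getD_insert_nil_loop {κ ν β : Type} [BEq κ] [LawfulBEq κ] [DecidableEq κ]
    (k : β → κ) (l : List β) (d : PySem.Dict κ (List ν)) (c : κ)
    (h : d.getD c [] = []) :
    (l.foldl (fun d x => d.insert (k x) []) d).getD c [] = [] := by
  induction l generalizing d with
  | nil => exact h
  | cons x t ih =>
    refine ih _ ?_
    rw [PySem.Dict.getD_insert]
    split <;> simp [h]

theorem pv_getD_sortloop {κ ν : Type} [BEq κ] [LawfulBEq κ] [DecidableEq κ]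
    (g : ν → ν) (d0 : ν) (ks : List κ) (hnd : ks.Nodup) (d : PySem.Dict κ ν) (c : κ) :
    (ks.foldl (fun d k => d.insert k (g (d.getD k d0))) d).getD c d0
      = if c ∈ ks then g (d.getD c d0) else d.getD c d0 := by
  induction ks generalizing d with
  | nil => simp
  | cons k t ih =>
    rcases List.nodup_cons.mp hnd with ⟨hk, hnd'⟩
    show (t.foldl _ (d.insert k (g (d.getD k d0)))).getD c d0 = _
    rw [ih hnd']
    by_cases hc : c ∈ t
    · have hck : c ≠ k := fun h => hk (h ▸ hc)
      simp [hc, PySem.Dict.getD_insert, hck, List.mem_cons]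
    · rw [PySem.Dict.getD_insert]
      by_cases hck : c = k
      · subst hck; simp [hc]
      · simp [hc, hck]

def pvPar (S : List (String × List (String × String))) (x : String) : Option String :=
  (PySem.Dict.mk ((PySem.Dict.mk S).getD x [])).get? "parent"

def pvKey (S : List (String × List (String × String))) (x : String) : String :=
  (PySem.Dict.mk ((PySem.Dict.mk S).getD x [])).getD "name" x

theorem pv_main (S : List (String × List (String × String)))
    (hnd : (S.map Prod.fst).Nodup) :
    build_children_map S = build_children_map_alt S := by
  have hSkeys : (PySem.Dict.mk S).keys.Nodup := by
    simpa [PySem.Dict.keys_mk] using hnd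
  have hlook : ∀ p ∈ S, (PySem.Dict.mk S).getD p.1 [] = p.2 := by
    intro p hp
    exact PySem.Dict.getD_of_mem_items (PySem.Dict.mk S) (k := p.1) (v := p.2) (by exact hp) hSkeys []
  -- A-side first loop rewritten through pvPar
  set dA := S.foldl (fun d p => d.modify (pvPar S p.1) [] (fun v => v ++ [p.1]))
      (PySem.Dict.empty : PySem.Dict (Option String) (List String)) with hdA
  have hA1 : S.foldl (fun d p => d.modify ((PySem.Dict.mk p.2).get? "parent") [] (fun v => v ++ [p.1]))
      (PySem.Dict.empty : PySem.Dict (Option String) (List String)) = dA := by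
    apply PySem.List.foldl_congr_mem
    intro acc p hp
    rw [pvPar, hlook p hp]
  have hAkeys : dA.keys = PySem.Set.ofList (S.map (fun p => pvPar S p.1)) := by
    rw [hdA, PySem.Dict.keys_foldl_modify_key S (fun p => pvPar S p.1) [] (fun _ p => fun v => v ++ [p.1]),
      PySem.Dict.keys_empty]
    rfl
  have hAnodup : dA.keys.Nodup := by
    rw [hdA]
    exact PySem.Dict.nodup_keys_foldl_modify_key S (fun p => pvPar S p.1) [] (fun _ p => fun v => v ++ [p.1]) _
      PySem.Dict.nodup_keys_empty
  have hAgetD : ∀ c, dA.getD c [] = (S.map Prod.fst).filter (fun x => pvPar S x == c) := by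
    intro c
    have hm : dA = (S.map (fun p => (pvPar S p.1, p.1))).foldl
        (fun d pr => d.modify pr.1 [] (fun v => v ++ [pr.2])) PySem.Dict.empty := by
      rw [hdA, List.foldl_map]
    rw [hm, PySem.Dict.getD_foldl_modify_append, PySem.Dict.getD_empty, List.nil_append,
      List.filter_map, List.map_map, List.filter_map]
    rfl
  set dA2 := dA.keys.foldl (fun d k => d.insert k (PySem.List.sorted (d.getD k []) (pvKey S) false)) dA with hdA2
  have hA2keys : dA2.keys = dA.keys := by
    rw [hdA2, PySem.Dict.keys_foldl_insert dA.keys (fun d k => PySem.List.sorted (d.getD k []) (pvKey S) false) dA]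
    exact pv_set_update_subset _ _ (fun x hx => hx)
  have hA2nodup : dA2.keys.Nodup := hA2keys ▸ hAnodup
  have hA2getD : ∀ c, dA2.getD c [] = PySem.List.sorted (dA.getD c []) (pvKey S) false := by
    intro c
    rw [hdA2, pv_getD_sortloop (fun v => PySem.List.sorted v (pvKey S) false) [] dA.keys hAnodup dA c]
    by_cases hc : c ∈ dA.keys
    · simp [hc]
    · have hcon : dA.contains c = false := by
        rcases Bool.eq_false_or_eq_true (dA.contains c) with h | h
        · exact absurd ((PySem.Dict.contains_iff_mem_keys dA c).mp h) hc
        · exact h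
      rw [if_neg hc, PySem.Dict.getD_of_not_contains dA [] hcon]
      rfl
  have hAresult : build_children_map S = dA2.items := by
    simp only [build_children_map]
    rw [hA1]
    rfl
  have hAitems : dA2.items = dA.keys.map (fun c => (c, PySem.List.sorted (dA.getD c []) (pvKey S) false)) := by
    rw [PySem.Dict.items_eq_map_keys dA2 hA2nodup [], hA2keys]
    exact List.map_congr_left (fun c hc => by rw [hA2getD c])
  -- B side
  set ids := S.map Prod.fst with hids
  set d0 := ids.foldl (fun d x => d.insert (pvPar S x) ([] : List String)) PySem.Dict.empty with hd0
  have hB0keys : d0.keys = PySem.Set.ofList (ids.map (pvPar S)) := by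
    rw [hd0, PySem.Dict.keys_foldl_insert_key ids (pvPar S) (fun _ _ => []) _, PySem.Dict.keys_empty]
    rfl
  have hB0nodup : d0.keys.Nodup := by
    rw [hd0]
    exact PySem.Dict.nodup_keys_foldl_insert_key ids (pvPar S) (fun _ _ => []) _ PySem.Dict.nodup_keys_empty
  have hB0getD : ∀ c, d0.getD c [] = [] := by
    intro c
    rw [hd0]
    exact pv_getD_insert_nil_loop (pvPar S) ids _ c (PySem.Dict.getD_empty _ _)
  set ord := PySem.List.sorted ids (pvKey S) false with hord
  set dB := ord.foldl (fun d x => d.modify (pvPar S x) [] (fun v => v ++ [x])) d0 with hdB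
  have hBkeys : dB.keys = d0.keys := by
    rw [hdB, PySem.Dict.keys_foldl_modify_key ord (pvPar S) [] (fun _ x => fun v => v ++ [x]) d0]
    apply pv_set_update_subset
    intro y hy
    rcases List.mem_map.mp hy with ⟨x, hx, rfl⟩
    rw [hB0keys]
    exact (PySem.Set.mem_ofList _ _).mpr
      (List.mem_map_of_mem ((PySem.List.mem_sorted ids (pvKey S) false x).mp hx))
  have hBnodup : dB.keys.Nodup := hBkeys ▸ hB0nodup
  have hBgetD : ∀ c, dB.getD c [] = ord.filter (fun x => pvPar S x == c) := by
    intro c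
    have hm : dB = (ord.map (fun x => (pvPar S x, x))).foldl
        (fun d pr => d.modify pr.1 [] (fun v => v ++ [pr.2])) d0 := by
      rw [hdB, List.foldl_map]
    rw [hm, PySem.Dict.getD_foldl_modify_append, hB0getD, List.nil_append, List.filter_map, List.map_map]
    simp [Function.comp_def]
  have hBresult : build_children_map_alt S = dB.items := by
    simp only [build_children_map_alt]
    rfl
  have hBitems : dB.items = d0.keys.map (fun c => (c, ord.filter (fun x => pvPar S x == c))) := by
    rw [PySem.Dict.items_eq_map_keys dB hBnodup [], hBkeys]
    exact List.map_congr_left (fun c hc => by rw [hBgetD c])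
  rw [hAresult, hAitems, hBresult, hBitems, hAkeys, hB0keys]
  have hkeys_eq : S.map (fun p => pvPar S p.1) = ids.map (pvPar S) := by
    rw [hids, List.map_map]
    rfl
  rw [hkeys_eq]
  apply List.map_congr_left
  intro c hc
  rw [hAgetD c, hord, ← pv_filter_sorted (pvKey S) (fun x => pvPar S x == c) ids]

-- ===== VERDICT (by name: the statement is the Claim_ definition above) =====
theorem build_children_map_spec : Claim_equal_build_children_map := by
  intro S _ hpre
  exact pv_main S hpre
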